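-- pv_equiv track=rewrite | github.com/Web3-Serializer/NextBullet | main.py | _find_matching_branch
-- ===== SOURCE A (Python) =====
-- def _find_matching_branch(blocks, start):
--     depth = 0
--     for i in range(start + 1, len(blocks)):
--         t = blocks[i].get('type', '')
--         if t == 'if':
--             depth += 1
--         elif t == 'endif':
--             if depth == 0:
--                 return i
--             depth -= 1
--         elif t in ('elif', 'else') and depth == 0:
--             return i
--     return len(blocks)
-- ===== SOURCE B (Python) =====
-- def _find_matching_branch(blocks, start):
--     n = len(blocks)
--
--     def skip_block(i):
--         # i is just past an 'if'; return the index just past its matching 'endif'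
--         while i < n:
--             t = blocks[i].get('type', '')
--             if t == 'if':
--                 i = skip_block(i + 1)
--             elif t == 'endif':
--                 return i + 1
--             else:
--                 i += 1
--         return n
--
--     i = start + 1
--     while i < n:
--         t = blocks[i].get('type', '')
--         if t == 'if':
--             i = skip_block(i + 1)
--         elif t in ('endif', 'elif', 'else'):
--             return i
--         else:
--             i += 1
--     return n
-- ===== Notes on version B (the rewrite author's own statement) =====
-- stated objective: alternative
-- what changed: Replaces A's flat depth-counter loop with a recursive block-skipping traversal: a helper recursively returns the index just past a nested if-block's matching endif, so no depth variable is maintained.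
import Mathlib
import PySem

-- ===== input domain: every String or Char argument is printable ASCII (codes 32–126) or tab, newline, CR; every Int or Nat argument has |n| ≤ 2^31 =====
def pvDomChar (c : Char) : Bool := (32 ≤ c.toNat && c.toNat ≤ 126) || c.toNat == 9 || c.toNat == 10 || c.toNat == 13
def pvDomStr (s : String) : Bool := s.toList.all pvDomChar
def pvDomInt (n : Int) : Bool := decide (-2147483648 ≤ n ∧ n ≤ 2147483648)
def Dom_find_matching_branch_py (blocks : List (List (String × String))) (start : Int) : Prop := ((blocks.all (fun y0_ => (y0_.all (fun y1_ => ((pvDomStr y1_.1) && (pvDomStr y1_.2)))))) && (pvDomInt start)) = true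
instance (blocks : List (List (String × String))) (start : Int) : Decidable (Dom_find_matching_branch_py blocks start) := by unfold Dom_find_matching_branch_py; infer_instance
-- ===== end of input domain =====

-- B replaces A's flat depth-counter scan by a recursive block-skipping traversal (objective: alternative, same cost).
-- blocks[i].get('type', '') — first-match association-list lookup with default
def pvGetType (row : List (String × String)) : String :=
  (PySem.Dict.mk row).getD "type" ""

-- ===== PORT A =====
-- the for-loop of A, as recursion over the index list range(start+1, len(blocks)) with the depth accumulator
def find_matching_branch_py_loop (blocks : List (List (String × String))) : List Int → Int → Int
  | [], _ => (blocks.length : Int)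
  | i :: rest, depth =>
    match PySem.List.pyGet? blocks i with
    | none => 0  -- IndexError; excluded by Pre_
    | some row =>
      let t := pvGetType row
      if t = "if" then find_matching_branch_py_loop blocks rest (depth + 1)
      else if t = "endif" then
        (if depth = 0 then i else find_matching_branch_py_loop blocks rest (depth - 1))
      else if (t = "elif" ∨ t = "else") ∧ depth = 0 then i
      else find_matching_branch_py_loop blocks rest depth

def find_matching_branch_py (blocks : List (List (String × String))) (start : Int) : Int :=
  find_matching_branch_py_loop blocks (PySem.List.pyRange (start + 1) (blocks.length : Int) 1) 0

-- ===== PORT B =====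
-- skip_block of Source B: i is just past an 'if'; returns the index just past its matching 'endif'.
-- fuel is a totality device only (2*len+1 steps always suffice; the Python recursion has no fuel).
def pvSkipB (blocks : List (List (String × String))) : Nat → Int → Int
  | 0, _ => (blocks.length : Int)
  | fuel + 1, i =>
    if i < (blocks.length : Int) then
      match PySem.List.pyGet? blocks i with
      | none => (blocks.length : Int)  -- IndexError; excluded by Pre_
      | some row =>
        let t := pvGetType row
        if t = "if" then pvSkipB blocks fuel (pvSkipB blocks fuel (i + 1))
        else if t = "endif" then i + 1
        else pvSkipB blocks fuel (i + 1)
    else (blocks.length : Int)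

-- the main while-loop of Source B
def pvScanB (blocks : List (List (String × String))) : Nat → Int → Int
  | 0, _ => (blocks.length : Int)
  | fuel + 1, i =>
    if i < (blocks.length : Int) then
      match PySem.List.pyGet? blocks i with
      | none => (blocks.length : Int)  -- IndexError; excluded by Pre_
      | some row =>
        let t := pvGetType row
        if t = "if" then pvScanB blocks fuel (pvSkipB blocks fuel (i + 1))
        else if t = "endif" ∨ t = "elif" ∨ t = "else" then i
        else pvScanB blocks fuel (i + 1)
    else (blocks.length : Int)

def find_matching_branch_py_alt (blocks : List (List (String × String))) (start : Int) : Int :=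
  pvScanB blocks (2 * blocks.length + 1) (start + 1)

-- ===== PRECONDITION & SPEC =====
-- Pre_ excludes exactly the inputs where A raises IndexError (the first scanned index start+1 below -len(blocks)).
def Pre_find_matching_branch_py (blocks : List (List (String × String))) (start : Int) : Prop :=
  -(blocks.length : Int) ≤ start + 1
instance (blocks : List (List (String × String))) (start : Int) : Decidable (Pre_find_matching_branch_py blocks start) := by unfold Pre_find_matching_branch_py; infer_instance

def pvWitness_find_matching_branch_py : (List (List (String × String))) × Int :=
  ([[("type", "if")], [("type", "x")], [("type", "endif")], [("type", "else")]], 0)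

def Spec_find_matching_branch_py (blocks : List (List (String × String))) (start : Int) (out : Int) : Prop := out = find_matching_branch_py_alt blocks start
instance (blocks : List (List (String × String))) (start : Int) (out : Int) : Decidable (Spec_find_matching_branch_py blocks start out) := by unfold Spec_find_matching_branch_py; infer_instance

-- ===== CLAIM (what is proved, stated in full; the proofs are below) =====
def Claim_equal_find_matching_branch_py : Prop := ∀ (blocks : List (List (String × String))) (start : Int), Dom_find_matching_branch_py blocks start → Pre_find_matching_branch_py blocks start → Spec_find_matching_branch_py blocks start (find_matching_branch_py blocks start)

-- ===== LEMMAS AND PROOFS =====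

-- A's loop rewritten as index recursion (proof-side reference semantics)
def pvALoop (blocks : List (List (String × String))) (i d : Int) : Int :=
  if _h : i < (blocks.length : Int) then
    match PySem.List.pyGet? blocks i with
    | none => 0
    | some row =>
      let t := pvGetType row
      if t = "if" then pvALoop blocks (i + 1) (d + 1)
      else if t = "endif" then
        (if d = 0 then i else pvALoop blocks (i + 1) (d - 1))
      else if (t = "elif" ∨ t = "else") ∧ d = 0 then i
      else pvALoop blocks (i + 1) d
  else (blocks.length : Int)
termination_by ((blocks.length : Int) - i).toNat
decreasing_by all_goals omega

theorem pvLoopA_eq_pvALoop (blocks : List (List (String × String))) :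
    ∀ (k : Nat) (i d : Int), ((blocks.length : Int) - i).toNat ≤ k →
      find_matching_branch_py_loop blocks (PySem.List.pyRange i (blocks.length : Int) 1) d
        = pvALoop blocks i d := by
  intro k
  induction k with
  | zero =>
    intro i d hk
    have hni : (blocks.length : Int) ≤ i := by omega
    rw [PySem.List.pyRange_one_eq_nil hni, pvALoop]
    simp [find_matching_branch_py_loop, not_lt.mpr hni]
  | succ k ih =>
    intro i d hk
    by_cases hi : i < (blocks.length : Int)
    · rw [PySem.List.pyRange_one_cons hi, pvALoop, dif_pos hi]
      rcases hget : PySem.List.pyGet? blocks i with _ | row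
      · simp [find_matching_branch_py_loop, hget]
      · simp only [find_matching_branch_py_loop, hget]
        have ih1 := fun d => ih (i + 1) d (by omega)
        by_cases h1 : pvGetType row = "if"
        · simp only [if_pos h1, ih1]
        · by_cases h2 : pvGetType row = "endif"
          · simp only [if_neg h1, if_pos h2]
            by_cases hd : d = 0
            · simp [hd]
            · simp [hd, ih1]
          · by_cases h3 : (pvGetType row = "elif" ∨ pvGetType row = "else") ∧ d = 0
            · simp only [if_neg h1, if_neg h2, if_pos h3]
            · simp only [if_neg h1, if_neg h2, if_neg h3, ih1]
    · have hni : (blocks.length : Int) ≤ i := by omega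
      rw [PySem.List.pyRange_one_eq_nil hni, pvALoop]
      simp [find_matching_branch_py_loop, not_lt.mpr hni]

-- skip never moves backwards and never passes the end
theorem pvSkipB_bounds (blocks : List (List (String × String))) :
    ∀ (f : Nat) (j : Int), j ≤ (blocks.length : Int) →
      j ≤ pvSkipB blocks f j ∧ pvSkipB blocks f j ≤ (blocks.length : Int) := by
  intro f
  induction f with
  | zero => intro j hj; simp [pvSkipB, hj]
  | succ f ih =>
    intro j hj
    rw [pvSkipB]
    by_cases hjlt : j < (blocks.length : Int)
    · rw [if_pos hjlt]
      rcases hget : PySem.List.pyGet? blocks j with _ | row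
      · simp; omega
      · simp only
        by_cases h1 : pvGetType row = "if"
        · simp only [if_pos h1]
          have hin := ih (j + 1) (by omega)
          have hout := ih (pvSkipB blocks f (j + 1)) hin.2
          constructor <;> omega
        · by_cases h2 : pvGetType row = "endif"
          · simp only [if_neg h1, if_pos h2]; omega
          · simp only [if_neg h1, if_neg h2]
            have := ih (j + 1) (by omega)
            constructor <;> omega
    · rw [if_neg hjlt]; omega

-- the central relation: skipping a block equals scanning it at depth d+1 and continuing at depth d
theorem pvSkipB_aLoop (blocks : List (List (String × String))) :
    ∀ (f : Nat) (i d : Int), (blocks.length : Int) - i ≤ (f : Int) →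
      -(blocks.length : Int) ≤ i → i ≤ (blocks.length : Int) → 0 ≤ d →
      pvALoop blocks i (d + 1) = pvALoop blocks (pvSkipB blocks f i) d := by
  intro f
  induction f with
  | zero =>
    intro i d hf _ hle _
    have hi : i = (blocks.length : Int) := by
      simp only [Nat.cast_zero] at hf; omega
    rw [pvSkipB]
    subst hi
    rw [pvALoop, dif_neg (by omega), pvALoop, dif_neg (by omega)]
  | succ f ih =>
    intro i d hf hlo hle hd
    by_cases hi : i < (blocks.length : Int)
    · have hsome : ∃ row, PySem.List.pyGet? blocks i = some row := by
        rcases hget : PySem.List.pyGet? blocks i with _ | row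
        · rw [PySem.List.pyGet?_eq_none_iff] at hget
          exact absurd ⟨by omega, by omega⟩ hget
        · exact ⟨row, rfl⟩
      rcases hsome with ⟨row, hget⟩
      rw [pvSkipB, if_pos hi]
      conv_lhs => rw [pvALoop]
      rw [dif_pos hi]
      simp only [hget]
      by_cases h1 : pvGetType row = "if"
      · simp only [if_pos h1]
        have hb1 := pvSkipB_bounds blocks f (i + 1) (by omega)
        have step1 := ih (i + 1) (d + 1) (by push_cast at hf ⊢; omega) (by omega) (by omega) (by omega)
        have step2 := ih (pvSkipB blocks f (i + 1)) d
          (by push_cast at hf ⊢; omega) (by omega) hb1.2 hd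
        rw [step1, step2]
      · by_cases h2 : pvGetType row = "endif"
        · simp only [if_neg h1, if_pos h2, if_neg (by omega : ¬ d + 1 = 0)]
          have : d + 1 - 1 = d := by ring
          rw [this]
        · have h3 : ¬ ((pvGetType row = "elif" ∨ pvGetType row = "else") ∧ d + 1 = 0) := by
            intro hc; omega
          simp only [if_neg h1, if_neg h2, if_neg h3]
          exact ih (i + 1) d (by push_cast at hf ⊢; omega) (by omega) (by omega) hd
    · have hni : (blocks.length : Int) ≤ i := by omega
      rw [pvSkipB, if_neg hi]
      rw [pvALoop, dif_neg hi, pvALoop, dif_neg (by omega)]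

-- the main scan of B computes A's loop at depth 0
theorem pvScanB_eq_pvALoop (blocks : List (List (String × String))) :
    ∀ (f : Nat) (i : Int), (blocks.length : Int) - i ≤ (f : Int) →
      -(blocks.length : Int) ≤ i →
      pvScanB blocks f i = pvALoop blocks i 0 := by
  intro f
  induction f with
  | zero =>
    intro i hf _
    have : (blocks.length : Int) ≤ i := by simp only [Nat.cast_zero] at hf; omega
    rw [pvScanB, pvALoop, dif_neg (by omega)]
  | succ f ih =>
    intro i hf hlo
    by_cases hi : i < (blocks.length : Int)
    · have hsome : ∃ row, PySem.List.pyGet? blocks i = some row := by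
        rcases hget : PySem.List.pyGet? blocks i with _ | row
        · rw [PySem.List.pyGet?_eq_none_iff] at hget
          exact absurd ⟨by omega, by omega⟩ hget
        · exact ⟨row, rfl⟩
      rcases hsome with ⟨row, hget⟩
      rw [pvScanB, if_pos hi, pvALoop, dif_pos hi]
      simp only [hget]
      by_cases h1 : pvGetType row = "if"
      · simp only [if_pos h1]
        have hb1 := pvSkipB_bounds blocks f (i + 1) (by omega)
        have hskip := pvSkipB_aLoop blocks f (i + 1) 0 (by push_cast at hf ⊢; omega)
          (by omega) (by omega) le_rfl
        rw [ih (pvSkipB blocks f (i + 1)) (by push_cast at hf ⊢; omega) (by omega), ← hskip]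
      · by_cases h2 : pvGetType row = "endif"
        · have hB : pvGetType row = "endif" ∨ pvGetType row = "elif" ∨ pvGetType row = "else" :=
            Or.inl h2
          simp only [if_neg h1, if_pos hB, if_pos h2]
          simp
        · by_cases h3 : pvGetType row = "elif" ∨ pvGetType row = "else"
          · have hB : pvGetType row = "endif" ∨ pvGetType row = "elif" ∨ pvGetType row = "else" :=
              Or.inr h3
            simp only [if_neg h1, if_pos hB, if_neg h2]
            simp [h3]
          · have hB : ¬ (pvGetType row = "endif" ∨ pvGetType row = "elif" ∨ pvGetType row = "else") := by
              intro hc; rcases hc with hc | hc; exact h2 hc; exact h3 hc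
            simp only [if_neg h1, if_neg hB, if_neg h2]
            rw [if_neg (by simp [h3])]
            exact ih (i + 1) (by push_cast at hf ⊢; omega) (by omega)
    · rw [pvScanB, if_neg hi, pvALoop, dif_neg hi]

-- ===== VERDICT (by name: the statement is the Claim_ definition above) =====
theorem find_matching_branch_py_spec : Claim_equal_find_matching_branch_py := by
  intro blocks start _ hpre
  unfold Spec_find_matching_branch_py find_matching_branch_py find_matching_branch_py_alt
  unfold Pre_find_matching_branch_py at hpre
  rw [pvLoopA_eq_pvALoop blocks ((blocks.length : Int) - (start + 1)).toNat (start + 1) 0 (by omega)]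
  rw [pvScanB_eq_pvALoop blocks (2 * blocks.length + 1) (start + 1) (by push_cast; omega) hpre]
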